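-- pv_equiv track=rewrite | github.com/jonathanvanschenck/TicTacToe | classes.py | genTriples
-- ===== SOURCE A (Python) =====
-- def genTriples(lis):
--     l = len(lis)
--     res = []
--     for i in range(l-2):
--         for j in range(i+1,l-1):
--             for k in range(j+1,l):
--                 res += [[lis[i],lis[j],lis[k]]]
--     return res
-- ===== SOURCE B (Python) =====
-- def genTriples(lis):
--     def choose(start, need):
--         if need == 0:
--             return [[]]
--         res = []
--         for i in range(start, len(lis) - need + 1):
--             for tail in choose(i + 1, need - 1):
--                 res.append([lis[i]] + tail)
--         return res
--     return choose(0, 3)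
-- ===== Notes on version B (the rewrite author's own statement) =====
-- stated objective: alternative
-- what changed: Replaces the three hard-coded nested index loops with a recursive helper choose(start, need) that builds all need-combinations of lis[start:] and is called with need=3.
import Mathlib
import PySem

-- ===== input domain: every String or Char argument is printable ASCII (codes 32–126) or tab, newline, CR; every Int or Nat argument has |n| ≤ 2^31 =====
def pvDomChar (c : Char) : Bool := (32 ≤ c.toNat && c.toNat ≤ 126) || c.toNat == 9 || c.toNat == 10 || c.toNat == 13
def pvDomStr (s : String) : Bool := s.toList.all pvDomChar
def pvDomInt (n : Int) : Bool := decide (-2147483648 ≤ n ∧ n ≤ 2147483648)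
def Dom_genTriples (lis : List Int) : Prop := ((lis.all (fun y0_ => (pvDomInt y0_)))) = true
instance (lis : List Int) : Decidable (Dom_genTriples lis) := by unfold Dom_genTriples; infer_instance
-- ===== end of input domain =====

-- B replaces A's three hard-coded nested index loops by a recursive choose(start, need) helper called with need=3 (alternative decomposition, same cost).
-- ===== PORT A =====
def genTriples (lis : List Int) : List (List Int) :=
  let l : Int := lis.length
  (PySem.List.pyRange 0 (l - 2) 1).foldl (fun res i =>
    (PySem.List.pyRange (i + 1) (l - 1) 1).foldl (fun res j =>
      (PySem.List.pyRange (j + 1) l 1).foldl (fun res k =>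
        res ++ [[PySem.List.pyGetD lis i 0, PySem.List.pyGetD lis j 0, PySem.List.pyGetD lis k 0]]) res) res) []

-- ===== PORT B =====
-- choose(start, need): all need-combinations of lis[start:], tails generated recursively
def pvChoose (lis : List Int) : Nat → Int → List (List Int)
  | 0, _ => [[]]
  | need + 1, start =>
    (PySem.List.pyRange start ((lis.length : Int) - (need + 1) + 1) 1).foldl
      (fun res i =>
        (pvChoose lis need (i + 1)).foldl
          (fun res tail => res ++ [[PySem.List.pyGetD lis i 0] ++ tail]) res) []

def genTriples_alt (lis : List Int) : List (List Int) := pvChoose lis 3 0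

-- ===== PRECONDITION & SPEC =====
def Spec_genTriples (lis : List Int) (out : List (List Int)) : Prop := out = genTriples_alt lis
instance (lis : List Int) (out : List (List Int)) : Decidable (Spec_genTriples lis out) := by unfold Spec_genTriples; infer_instance

-- ===== CLAIM (what is proved, stated in full; the proofs are below) =====
def Claim_equal_genTriples : Prop := ∀ (lis : List Int), Dom_genTriples lis → Spec_genTriples lis (genTriples lis)

-- ===== LEMMAS AND PROOFS =====

-- ===== VERDICT (by name: the statement is the Claim_ definition above) =====
theorem genTriples_spec : Claim_equal_genTriples := by
  intro lis _
  unfold Spec_genTriples genTriples genTriples_alt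
  simp only [pvChoose, List.foldl_nil, List.foldl_cons,
    PySem.List.foldl_append_singleton_eq_map, PySem.List.foldl_append_eq_flatMap,
    List.singleton_append, List.nil_append,
    List.map_flatMap, List.map_map, Function.comp_def]
  push_cast
  ring_nf
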